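-- pv_equiv track=rewrite | github.com/MarcosBianchii/Teoria-de-Algoritmos | guias/pd/10.py | plan_operativo
-- ===== SOURCE A (Python) =====
-- def plan_operativo(L, C, M):
--     """
--     f(0) = 0
--     g(0) = 0
--     f(n) = min(f(n - 1), g(n - 1) + m) + f(n)
--     g(n) = min(g(n - 1), f(n - 1) + m) + g(n)
--
--     La complejidad del algoritmo es O(n)
--     """
--     def plan_operativo_pd(n, l, c):
--         # O(n)
--         lon = [0] * (n + 1)
--         cal = [0] * (n + 1)
--
--         # O(n)
--         for n in range(1, n + 1):
--             lon[n] = min(lon[n - 1], cal[n - 1] + M) + l[n]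
--             cal[n] = min(cal[n - 1], lon[n - 1] + M) + c[n]
--
--         return lon, cal
--
--     def construir_solucion(n, lon, cal):
--         i = 0 if lon[n] < cal[n] else 1
--         f = [lon, cal]
--         sol = []
--
--         # O(n)
--         for n in range(n, 0, -1):
--             sol.append("londres" if i == 0 else "california")
--
--             if f[1 - i][n - 1] + M < f[i][n - 1]:
--                 i = 1 - i
--
--         # O(n)
--         sol.reverse()
--         return sol
--
--     n = len(L)  # O(n)
--     l, c = [0] + L, [0] + C
--     lon, cal = plan_operativo_pd(n, l, c)
--     return construir_solucion(n, lon, cal)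
-- ===== SOURCE B (Python) =====
-- def plan_operativo(L, C, M):
--     # Single forward pass that carries the best plan ending in each city as a
--     # persistent (shared) cons list; no cost arrays and no backward
--     # re-derivation of decisions: the chosen plan is just read off at the end.
--     lo = ca = 0
--     pl = pc = None  # cons cells (name, tail), newest first, shared tails
--     for k in range(len(L)):
--         npl = ("londres", pl if lo <= ca + M else pc)
--         npc = ("california", pc if ca <= lo + M else pl)
--         lo, ca = min(lo, ca + M) + L[k], min(ca, lo + M) + C[k]
--         pl, pc = npl, npc
--     node = pl if lo < ca else pc
--     out = []
--     while node is not None: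
--         out.append(node[0])
--         node = node[1]
--     out.reverse()
--     return out
-- ===== Notes on version B (the rewrite author's own statement) =====
-- stated objective: alternative
-- what changed: B is a single forward pass that carries the best plan ending in each city as a persistent shared cons list (extending the cheaper predecessor's plan each step) and simply reads the chosen plan off at the end, eliminating A's cost arrays and its arithmetic backward re-derivation of each decision.
import Mathlib
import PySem

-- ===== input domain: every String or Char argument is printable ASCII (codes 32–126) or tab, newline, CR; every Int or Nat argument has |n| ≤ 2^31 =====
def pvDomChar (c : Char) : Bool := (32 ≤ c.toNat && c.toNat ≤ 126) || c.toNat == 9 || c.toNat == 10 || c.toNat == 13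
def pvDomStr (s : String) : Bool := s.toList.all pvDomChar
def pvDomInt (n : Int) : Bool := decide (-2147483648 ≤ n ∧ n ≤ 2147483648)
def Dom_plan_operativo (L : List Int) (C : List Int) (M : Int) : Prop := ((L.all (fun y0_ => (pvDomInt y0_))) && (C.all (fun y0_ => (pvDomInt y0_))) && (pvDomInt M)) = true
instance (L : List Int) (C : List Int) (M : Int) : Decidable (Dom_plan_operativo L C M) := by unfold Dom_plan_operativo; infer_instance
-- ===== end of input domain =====

-- B replaces A's cost-array DP + arithmetic backward reconstruction by a single
-- forward pass carrying the best plan ending in each city as a shared cons list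
-- (alternative decomposition: no decision re-derivation phase, same O(n) cost).


-- ===== PORT A =====
-- one step of A's forward DP loop (the Python `for n in range(1, n + 1)` body);
-- indices are in range under Pre_, so list reads are `getD` (exact there)
def pvAStep (M : Int) (l c : List Int) (p : List Int × List Int) (k : Nat) : List Int × List Int :=
  let lonk := min (p.1.getD (k-1) 0) (p.2.getD (k-1) 0 + M) + l.getD k 0
  let lon' := p.1.set k lonk
  let calk := min (p.2.getD (k-1) 0) (lon'.getD (k-1) 0 + M) + c.getD k 0
  (lon', p.2.set k calk)

-- one step of A's `construir_solucion` loop (append name, maybe flip i)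
def pvABack (M : Int) (lon cal : List Int) (st : Nat × List String) (k : Nat) : Nat × List String :=
  let sol := st.2 ++ [if st.1 == 0 then "londres" else "california"]
  let fi := if st.1 == 0 then lon else cal
  let fo := if st.1 == 0 then cal else lon
  if fo.getD (k-1) 0 + M < fi.getD (k-1) 0 then (1 - st.1, sol) else (st.1, sol)

def plan_operativo (L : List Int) (C : List Int) (M : Int) : List String :=
  let n := L.length
  let l := 0 :: L
  let c := 0 :: C
  let p := (List.range' 1 n).foldl (pvAStep M l c) (List.replicate (n+1) 0, List.replicate (n+1) 0)
  let i0 : Nat := if p.1.getD n 0 < p.2.getD n 0 then 0 else 1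
  (((List.range' 1 n).reverse).foldl (pvABack M p.1 p.2) (i0, [])).2.reverse

-- ===== PORT B =====
-- one step of B's forward pass: the two running costs and the two best plans,
-- each a cons list newest-first (Python's shared (name, tail) cells)
def pvBStep (L C : List Int) (M : Int) (s : Int × Int × List String × List String) (k : Nat) :
    Int × Int × List String × List String :=
  let npl := "londres" :: (if s.1 ≤ s.2.1 + M then s.2.2.1 else s.2.2.2)
  let npc := "california" :: (if s.2.1 ≤ s.1 + M then s.2.2.2 else s.2.2.1)
  (min s.1 (s.2.1 + M) + L.getD k 0, min s.2.1 (s.1 + M) + C.getD k 0, npl, npc)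

def plan_operativo_alt (L : List Int) (C : List Int) (M : Int) : List String :=
  let s := (List.range L.length).foldl (pvBStep L C M) (0, 0, [], [])
  ((if s.1 < s.2.1 then s.2.2.1 else s.2.2.2)).reverse

-- ===== PRECONDITION & SPEC =====
-- Python A raises IndexError (c[n]) when len(C) < len(L); exactly those inputs are excluded.
def Pre_plan_operativo (L : List Int) (C : List Int) (M : Int) : Prop := L.length ≤ C.length
instance (L : List Int) (C : List Int) (M : Int) : Decidable (Pre_plan_operativo L C M) := by unfold Pre_plan_operativo; infer_instance
def pvWitness_plan_operativo : List Int × List Int × Int := ([1, 3, 2], [2, 1, 4], 2)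

def Spec_plan_operativo (L : List Int) (C : List Int) (M : Int) (out : List String) : Prop := out = plan_operativo_alt L C M
instance (L : List Int) (C : List Int) (M : Int) (out : List String) : Decidable (Spec_plan_operativo L C M out) := by unfold Spec_plan_operativo; infer_instance

-- ===== CLAIM (what is proved, stated in full; the proofs are below) =====
def Claim_equal_plan_operativo : Prop := ∀ (L : List Int) (C : List Int) (M : Int), Dom_plan_operativo L C M → Pre_plan_operativo L C M → Spec_plan_operativo L C M (plan_operativo L C M)

-- ===== LEMMAS AND PROOFS =====

-- the common functional DP: pvF k = (lon[k], cal[k])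
def pvF (L C : List Int) (M : Int) : Nat → Int × Int
  | 0 => (0, 0)
  | k+1 => (min (pvF L C M k).1 ((pvF L C M k).2 + M) + L.getD k 0,
            min (pvF L C M k).2 ((pvF L C M k).1 + M) + C.getD k 0)

-- the stay decisions at step k+1 (index k)
def pvSL (L C : List Int) (M : Int) (k : Nat) : Bool := decide ((pvF L C M k).1 ≤ (pvF L C M k).2 + M)
def pvSC (L C : List Int) (M : Int) (k : Nat) : Bool := decide ((pvF L C M k).2 ≤ (pvF L C M k).1 + M)

-- predecessor state of the walk
def pvNext (sL sC : Nat → Bool) (i k : Nat) : Nat :=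
  if i == 0 then (if sL k then 0 else 1) else (if sC k then 1 else 0)

-- the plan for steps 1..k ending in state i
def pvSeg (sL sC : Nat → Bool) (i : Nat) : Nat → List String
  | 0 => []
  | k+1 => pvSeg sL sC (pvNext sL sC i k) k ++ [if i == 0 then "londres" else "california"]

-- A's forward fold computes pvF in the arrays
theorem pvA_fwd (L C : List Int) (M : Int) :
    ∀ m, m ≤ L.length →
      (let p := (List.range' 1 m).foldl (pvAStep M (0 :: L) (0 :: C))
          (List.replicate (L.length+1) 0, List.replicate (L.length+1) 0)
       p.1.length = L.length+1 ∧ p.2.length = L.length+1 ∧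
       ∀ j, j ≤ m → p.1.getD j 0 = (pvF L C M j).1 ∧ p.2.getD j 0 = (pvF L C M j).2) := by
  intro m
  induction m with
  | zero =>
    intro _
    refine ⟨by simp, by simp, ?_⟩
    intro j hj
    interval_cases j
    simp [pvF, List.getD]
  | succ m ih =>
    intro hm
    have ih' := ih (by omega : m ≤ L.length)
    obtain ⟨hlen1, hlen2, hval⟩ := ih'
    rw [List.range'_concat, List.foldl_append]
    set p := (List.range' 1 m).foldl (pvAStep M (0 :: L) (0 :: C))
      (List.replicate (L.length+1) 0, List.replicate (L.length+1) 0) with hp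
    simp only [List.foldl_cons, List.foldl_nil]
    rw [show (1 + 1 * m) = m + 1 from by omega]
    have hm1 : m + 1 < p.1.length := by omega
    have hm2 : m + 1 < p.2.length := by omega
    have hFm := hval m (le_refl m)
    have hgetl : ((0 : Int) :: L).getD (m+1) 0 = L.getD m 0 := by
      simp [List.getD]
    have hgetc : ((0 : Int) :: C).getD (m+1) 0 = C.getD m 0 := by
      simp [List.getD]
    unfold pvAStep
    have hsub : m + 1 - 1 = m := by omega
    refine ⟨by simp [hlen1], by simp [hlen2], ?_⟩
    intro j hj
    rcases Nat.lt_or_ge j (m+1) with hj' | hj'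
    · have hne : m + 1 ≠ j := by omega
      have hvj := hval j (by omega)
      constructor
      · simp only [hsub]
        rw [List.getD, List.getElem?_set_ne hne, ← List.getD]
        exact hvj.1
      · simp only [hsub]
        rw [List.getD, List.getElem?_set_ne hne, ← List.getD]
        exact hvj.2
    · have hje : j = m + 1 := by omega
      subst hje
      constructor
      · simp only [hsub]
        rw [List.getD, List.getElem?_set_self hm1]
        simp only [Option.getD_some]
        rw [hgetl, hFm.1, hFm.2]
        rfl
      · simp only [hsub]
        rw [List.getD, List.getElem?_set_self hm2]
        simp only [Option.getD_some]
        have : ((p.1.set (m+1) (min (p.1.getD m 0) (p.2.getD m 0 + M) + ((0:Int) :: L).getD (m+1) 0)).getD m 0) = p.1.getD m 0 := by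
          rw [List.getD, List.getElem?_set_ne (by omega : m + 1 ≠ m), ← List.getD]
        rw [this, hgetc, hFm.1, hFm.2]
        rfl

-- A's backward fold produces pvSeg (reversed, appended to the accumulator)
theorem pvA_back (L C : List Int) (M : Int) (lon cal : List Int)
    (h : ∀ j, j ≤ L.length → lon.getD j 0 = (pvF L C M j).1 ∧ cal.getD j 0 = (pvF L C M j).2) :
    ∀ k, k ≤ L.length → ∀ i, (i = 0 ∨ i = 1) → ∀ acc,
      (((List.range' 1 k).reverse).foldl (pvABack M lon cal) (i, acc)).2
        = acc ++ (pvSeg (pvSL L C M) (pvSC L C M) i k).reverse := by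
  intro k
  induction k with
  | zero => intro _ i _ acc; simp [pvSeg]
  | succ k ih =>
    intro hk i hi acc
    rw [List.range'_concat, List.reverse_append]
    simp only [List.reverse_singleton, List.singleton_append, List.foldl_cons]
    rw [show (1 + 1 * k) = k + 1 from by omega]
    have hsub : k + 1 - 1 = k := by omega
    have hFk := h k (by omega)
    have hstep : pvABack M lon cal (i, acc) (k + 1)
        = (pvNext (pvSL L C M) (pvSC L C M) i k,
           acc ++ [if i == 0 then "londres" else "california"]) := by
      unfold pvABack pvNext pvSL pvSC
      rcases hi with hi | hi <;> subst hi
      · have e0 : ((0:Nat) == 0) = true := rfl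
        simp only [hsub, e0, if_true]
        rw [hFk.1, hFk.2]
        by_cases hc : (pvF L C M k).2 + M < (pvF L C M k).1
        · rw [if_pos hc, if_neg (by simp; omega)]
        · rw [if_neg hc, if_pos (by simp; omega)]
      · have e1 : ((1:Nat) == 0) = false := rfl
        simp only [hsub, e1, Bool.false_eq_true, if_false]
        rw [hFk.1, hFk.2]
        by_cases hc : (pvF L C M k).1 + M < (pvF L C M k).2
        · rw [if_pos hc, if_neg (by simp; omega)]
        · rw [if_neg hc, if_pos (by simp; omega)]
    rw [hstep, ih (by omega) _ ?_ _]
    · rw [pvSeg]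
      simp
    · unfold pvNext
      rcases hi with hi | hi <;> subst hi <;> by_cases hL : pvSL L C M k <;> by_cases hC : pvSC L C M k <;> simp [hL, hC]

-- B's forward fold carries pvF's costs and the two pvSeg plans
theorem pvB_inv (L C : List Int) (M : Int) :
    ∀ m, (let s := (List.range m).foldl (pvBStep L C M) (0, 0, [], [])
      s.1 = (pvF L C M m).1 ∧ s.2.1 = (pvF L C M m).2 ∧
      s.2.2.1 = (pvSeg (pvSL L C M) (pvSC L C M) 0 m).reverse ∧
      s.2.2.2 = (pvSeg (pvSL L C M) (pvSC L C M) 1 m).reverse) := by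
  intro m
  induction m with
  | zero => exact ⟨rfl, rfl, rfl, rfl⟩
  | succ m ih =>
    obtain ⟨h1, h2, h3, h4⟩ := ih
    rw [List.range_succ, List.foldl_append]
    set s := (List.range m).foldl (pvBStep L C M) (0, 0, ([] : List String), ([] : List String)) with hs
    simp only [List.foldl_cons, List.foldl_nil]
    unfold pvBStep
    refine ⟨by simp only [h1, h2]; rfl, by simp only [h1, h2]; rfl, ?_, ?_⟩
    · rw [pvSeg]
      simp only [h1, h2, h3, h4]
      unfold pvNext pvSL pvSC
      by_cases hc : (pvF L C M m).1 ≤ (pvF L C M m).2 + M <;> simp [hc]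
    · rw [pvSeg]
      simp only [h1, h2, h3, h4]
      unfold pvNext pvSL pvSC
      by_cases hc : (pvF L C M m).2 ≤ (pvF L C M m).1 + M <;> simp [hc]

-- ===== VERDICT (by name: the statement is the Claim_ definition above) =====
theorem plan_operativo_spec : Claim_equal_plan_operativo := by
  intro L C M _ _
  unfold Spec_plan_operativo plan_operativo plan_operativo_alt
  simp only []
  obtain ⟨ha1, ha2, haval⟩ := pvA_fwd L C M L.length (le_refl _)
  obtain ⟨hb1, hb2, hb3, hb4⟩ := pvB_inv L C M L.length
  set pA := (List.range' 1 L.length).foldl (pvAStep M (0 :: L) (0 :: C))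
    (List.replicate (L.length+1) 0, List.replicate (L.length+1) 0) with hpA
  set sB := (List.range L.length).foldl (pvBStep L C M) (0, 0, ([] : List String), ([] : List String)) with hsB
  have hn := haval L.length (le_refl _)
  rw [hn.1, hn.2, ← hb1, ← hb2]
  by_cases hc : sB.1 < sB.2.1
  · rw [if_pos hc, if_pos hc, hb3,
      pvA_back L C M pA.1 pA.2 haval L.length (le_refl _) 0 (Or.inl rfl) []]
    simp
  · rw [if_neg hc, if_neg hc, hb4,
      pvA_back L C M pA.1 pA.2 haval L.length (le_refl _) 1 (Or.inr rfl) []]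
    simp
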